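-- pv_equiv track=rewrite | github.com/foxxpy/Codingame-Puzzle-Moyen | 027. Graphique Ascii/graphique_ascii.py | draw_board
-- ===== SOURCE A (Python) =====
-- def draw_board(min_x, max_x, min_y, max_y):
--     """On dessine la grille"""
--     board = []
--     for y in range(max_y, min_y-1, -1):
--         row = []
--         for x in range(min_x, max_x+1):
--             if x == 0 and y != 0:
--                 row.append("|")
--             elif x != 0 and y == 0:
--                 row.append("-")
--             elif x == 0 and y == 0:
--                 row.append("+")
--             else:
--                 row.append(".")
--         board.append(row)
--     return board
--
-- min_x = -1
--
-- max_x = 1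
--
-- min_y = -1
--
-- max_y = +1
--
-- board = draw_board(min_x, max_x, min_y, max_y)
-- ===== SOURCE B (Python) =====
-- def draw_board(min_x, max_x, min_y, max_y):
--     """Draw background of dots first, then paint the axes on top."""
--     width = max_x - min_x + 1
--     board = [["."] * width for _ in range(max_y, min_y - 1, -1)]
--     if min_x <= 0 <= max_x:
--         for row in board:
--             row[-min_x] = "|"
--     if min_y <= 0 <= max_y:
--         board[max_y] = ["-"] * width
--     if min_x <= 0 <= max_x and min_y <= 0 <= max_y:
--         board[max_y][-min_x] = "+"
--     return board
-- ===== Notes on version B (the rewrite author's own statement) =====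
-- stated objective: simpler
-- what changed: Instead of A's nested loops with a four-way branch per cell, B allocates the full dotted grid with a comprehension and then paints the y-axis column, the x-axis row and the origin '+' on top, each guarded by a range check.
import Mathlib
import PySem

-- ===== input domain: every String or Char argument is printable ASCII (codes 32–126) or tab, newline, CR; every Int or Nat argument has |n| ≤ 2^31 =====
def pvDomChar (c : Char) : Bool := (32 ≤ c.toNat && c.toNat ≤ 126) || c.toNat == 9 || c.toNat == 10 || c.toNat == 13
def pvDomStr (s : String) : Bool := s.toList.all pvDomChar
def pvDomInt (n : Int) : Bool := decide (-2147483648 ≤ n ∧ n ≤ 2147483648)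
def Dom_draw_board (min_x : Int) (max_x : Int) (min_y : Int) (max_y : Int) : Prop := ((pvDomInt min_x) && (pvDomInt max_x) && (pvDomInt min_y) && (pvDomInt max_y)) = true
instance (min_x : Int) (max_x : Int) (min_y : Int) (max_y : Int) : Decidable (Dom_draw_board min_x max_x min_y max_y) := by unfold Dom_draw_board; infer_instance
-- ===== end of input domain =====

-- B draws the dotted background with comprehensions and then paints the y-axis column, x-axis row
-- and origin on top, instead of A's per-cell four-way branch; objective: simpler.


-- ===== PORT A =====
def draw_board (min_x : Int) (max_x : Int) (min_y : Int) (max_y : Int) : List (List String) :=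
  (PySem.List.pyRange max_y (min_y - 1) (-1)).foldl (fun board y =>
    board ++ [(PySem.List.pyRange min_x (max_x + 1) 1).foldl (fun row x =>
      row ++ [if x = 0 ∧ y ≠ 0 then "|"
              else if x ≠ 0 ∧ y = 0 then "-"
              else if x = 0 ∧ y = 0 then "+"
              else "."]) []]) []

-- ===== PORT B =====
def draw_board_alt (min_x : Int) (max_x : Int) (min_y : Int) (max_y : Int) : List (List String) :=
  let width := max_x - min_x + 1
  let board := (PySem.List.pyRange max_y (min_y - 1) (-1)).map
                 (fun _ => PySem.List.pyRepeat ["."] width)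
  let board := if min_x ≤ 0 ∧ 0 ≤ max_x then
                 board.map (fun row => row.set (-min_x).toNat "|")
               else board
  let board := if min_y ≤ 0 ∧ 0 ≤ max_y then
                 board.set max_y.toNat (PySem.List.pyRepeat ["-"] width)
               else board
  let board := if (min_x ≤ 0 ∧ 0 ≤ max_x) ∧ (min_y ≤ 0 ∧ 0 ≤ max_y) then
                 board.modify max_y.toNat (fun row => row.set (-min_x).toNat "+")
               else board
  board

-- ===== PRECONDITION & SPEC =====
def Spec_draw_board (min_x : Int) (max_x : Int) (min_y : Int) (max_y : Int) (out : List (List String)) : Prop := out = draw_board_alt min_x max_x min_y max_y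
instance (min_x : Int) (max_x : Int) (min_y : Int) (max_y : Int) (out : List (List String)) : Decidable (Spec_draw_board min_x max_x min_y max_y out) := by unfold Spec_draw_board; infer_instance

-- ===== CLAIM (what is proved, stated in full; the proofs are below) =====
def Claim_equal_draw_board : Prop := ∀ (min_x : Int) (max_x : Int) (min_y : Int) (max_y : Int), Dom_draw_board min_x max_x min_y max_y → Spec_draw_board min_x max_x min_y max_y (draw_board min_x max_x min_y max_y)

-- ===== LEMMAS AND PROOFS =====

-- the cell A computes at coordinates (x, y)
def pvCell (x y : Int) : String :=
  if x = 0 ∧ y ≠ 0 then "|"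
  else if x ≠ 0 ∧ y = 0 then "-"
  else if x = 0 ∧ y = 0 then "+"
  else "."

theorem draw_board_eq_map (min_x max_x min_y max_y : Int) :
    draw_board min_x max_x min_y max_y =
      (PySem.List.pyRange max_y (min_y - 1) (-1)).map (fun y =>
        (PySem.List.pyRange min_x (max_x + 1) 1).map (fun x => pvCell x y)) := by
  unfold draw_board pvCell
  simp only [PySem.List.foldl_append_singleton_eq_map, List.nil_append]

-- one row of A's board, when the y-axis column is absent: all dots
theorem row_no_col (min_x max_x y : Int) (hx : ¬(min_x ≤ 0 ∧ 0 ≤ max_x)) :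
    (PySem.List.pyRange min_x (max_x + 1) 1).map (fun x => pvCell x y) =
      List.replicate (max_x - min_x + 1).toNat (if y = 0 then "-" else ".") := by
  rw [List.eq_replicate_iff]
  constructor
  · simp [PySem.List.length_pyRange_one]; omega
  · intro b hb
    simp only [List.mem_map] at hb
    obtain ⟨x, hxmem, rfl⟩ := hb
    rw [PySem.List.mem_pyRange_one] at hxmem
    have hx0 : x ≠ 0 := by omega
    unfold pvCell
    by_cases hy : y = 0 <;> simp [hx0, hy]

-- one row of A's board, when the y-axis column is present: base row with one cell overwritten
theorem row_col (min_x max_x y : Int) (hx : min_x ≤ 0 ∧ 0 ≤ max_x) :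
    (PySem.List.pyRange min_x (max_x + 1) 1).map (fun x => pvCell x y) =
      (List.replicate (max_x - min_x + 1).toNat (if y = 0 then "-" else ".")).set
        (-min_x).toNat (if y = 0 then "+" else "|") := by
  apply List.ext_getElem
  · simp [PySem.List.length_pyRange_one]; omega
  · intro j h1 h2
    rw [List.getElem_map, PySem.List.getElem_pyRange_one, List.getElem_set]
    have hj : (j : Int) < max_x + 1 - min_x := by
      have := h1; simp [PySem.List.length_pyRange_one] at this; omega
    unfold pvCell
    by_cases hc : (-min_x).toNat = j
    · have : min_x + (j : Int) = 0 := by omega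
      by_cases hy : y = 0 <;> simp [hc, this, hy]
    · have : min_x + (j : Int) ≠ 0 := by omega
      by_cases hy : y = 0 <;> simp [hc, this, hy, List.getElem_replicate]

-- ===== VERDICT (by name: the statement is the Claim_ definition above) =====
theorem draw_board_spec : Claim_equal_draw_board := by
  intro min_x max_x min_y max_y _
  show draw_board min_x max_x min_y max_y = draw_board_alt min_x max_x min_y max_y
  rw [draw_board_eq_map]
  unfold draw_board_alt
  simp only [PySem.List.pyRepeat_singleton]
  by_cases hx : min_x ≤ 0 ∧ 0 ≤ max_x <;> by_cases hy : min_y ≤ 0 ∧ 0 ≤ max_y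
  · -- both axes present
    rw [if_pos hx, if_pos hy, if_pos ⟨hx, hy⟩]
    simp only [PySem.List.pyRange_neg_one, List.map_map]
    apply List.ext_getElem
    · simp
    · intro i h1 h2
      have hilen : i < (max_y - (min_y - 1)).toNat := by simpa using h1
      simp only [List.getElem_map, List.getElem_modify, List.getElem_set, List.getElem_range,
        Function.comp]
      rw [row_col min_x max_x _ hx]
      by_cases hi : max_y.toNat = i
      · have h0 : max_y - (i : Int) = 0 := by omega
        simp [hi, h0]
      · have h0 : max_y - (i : Int) ≠ 0 := by omega
        simp [hi, h0]
  · -- only the y-axis column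
    rw [if_pos hx, if_neg hy, if_neg (by tauto), List.map_map]
    apply List.map_congr_left
    intro y hmem
    rw [PySem.List.mem_pyRange_neg_one] at hmem
    have hy0 : y ≠ 0 := by omega
    rw [row_col min_x max_x _ hx]
    simp [hy0]
  · -- only the x-axis row
    rw [if_neg hx, if_pos hy, if_neg (by tauto)]
    simp only [PySem.List.pyRange_neg_one, List.map_map]
    apply List.ext_getElem
    · simp
    · intro i h1 h2
      have hilen : i < (max_y - (min_y - 1)).toNat := by simpa using h1
      simp only [List.getElem_map, List.getElem_set, List.getElem_range, Function.comp]
      rw [row_no_col min_x max_x _ hx]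
      by_cases hi : max_y.toNat = i
      · have h0 : max_y - (i : Int) = 0 := by omega
        simp [hi, h0]
      · have h0 : max_y - (i : Int) ≠ 0 := by omega
        simp [hi, h0]
  · -- no axis visible
    rw [if_neg hx, if_neg hy, if_neg (by tauto)]
    apply List.map_congr_left
    intro y hmem
    rw [PySem.List.mem_pyRange_neg_one] at hmem
    have hy0 : y ≠ 0 := by omega
    rw [row_no_col min_x max_x _ hx]
    simp [hy0]
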